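-- pv_equiv track=rewrite | github.com/autumngarage/cortex | src/cortex/validation.py | _strip_frontmatter_and_fences
-- ===== SOURCE A (Python) =====
-- def _strip_frontmatter_and_fences(text: str) -> list[tuple[int, str]]:
--     """Return ``(line_number, line)`` pairs for lines that are *not* inside
--     YAML frontmatter at the top of the file or fenced code blocks.
--
--     Line numbers are 1-indexed (matching how editors / issue messages display
--     them). Frontmatter is recognized only as ``---`` on the first non-empty
--     line through the next ``---``. Fences are CommonMark ```` ``` ```` /
--     ``~~~`` (matched on the leading marker, like the existing fence-aware
--     helpers in this module).
--     """
--     lines = text.splitlines()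
--     result: list[tuple[int, str]] = []
--
--     # Detect YAML frontmatter: first non-empty line must be `---`.
--     in_frontmatter = False
--     frontmatter_end: int | None = None
--     for idx, line in enumerate(lines):
--         if line.strip() == "":
--             continue
--         if line.strip() == "---":
--             in_frontmatter = True
--             # Find closing `---`.
--             for j in range(idx + 1, len(lines)):
--                 if lines[j].strip() == "---":
--                     frontmatter_end = j
--                     break
--         break
--
--     fence: str | None = None
--     for i, line in enumerate(lines):
--         if in_frontmatter and frontmatter_end is not None and i <= frontmatter_end:
--             continue
--         stripped = line.lstrip()
--         if fence is None:
--             if stripped.startswith("```") or stripped.startswith("~~~"):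
--                 fence = stripped[:3]
--                 continue
--             result.append((i + 1, line))
--         else:
--             if stripped.startswith(fence):
--                 fence = None
--             # Lines inside a fence are skipped entirely.
--     return result
-- ===== SOURCE B (Python) =====
-- def _strip_frontmatter_and_fences(text: str) -> list[tuple[int, str]]:
--     """Single forward pass over the lines driven by a state variable:
--     'start' (only blank lines seen so far), 'fm' (inside a candidate
--     frontmatter block), 'body' (normal fence-aware emission). Lines whose
--     fate is undecided (leading blanks, an unclosed frontmatter block) are
--     buffered and flushed through the normal emitter once decided."""
--     out: list[tuple[int, str]] = []
--     fence = None  # active fence marker, or None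
--
--     def emit(i: int, line: str) -> None:
--         nonlocal fence
--         s = line.lstrip()
--         if fence is None:
--             if s.startswith("```") or s.startswith("~~~"):
--                 fence = s[:3]
--             else:
--                 out.append((i + 1, line))
--         elif s.startswith(fence):
--             fence = None
--
--     state = "start"
--     buf: list[tuple[int, str]] = []  # pending (index, line) pairs
--     for i, line in enumerate(text.splitlines()):
--         if state == "start":
--             s = line.strip()
--             if s == "":
--                 buf.append((i, line))
--             elif s == "---":
--                 buf.append((i, line))
--                 state = "fm"
--             else:
--                 for p in buf:
--                     emit(*p)
--                 buf = []
--                 state = "body"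
--                 emit(i, line)
--         elif state == "fm":
--             if line.strip() == "---":
--                 buf = []  # whole frontmatter block dropped
--                 state = "body"
--             else:
--                 buf.append((i, line))
--         else:
--             emit(i, line)
--     for p in buf:  # EOF while undecided: all-blank file or unclosed frontmatter
--         emit(*p)
--     return out
-- ===== Notes on version B (the rewrite author's own statement) =====
-- stated objective: alternative
-- what changed: Replaces A's frontmatter pre-scan (with an inner closing-marker search) followed by a second index-guarded walk of all lines by a single forward pass driven by a state variable (start / frontmatter buffer / body) that buffers undecided lines and flushes them through the fence-aware emitter at a decision point or EOF.
import Mathlib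
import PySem

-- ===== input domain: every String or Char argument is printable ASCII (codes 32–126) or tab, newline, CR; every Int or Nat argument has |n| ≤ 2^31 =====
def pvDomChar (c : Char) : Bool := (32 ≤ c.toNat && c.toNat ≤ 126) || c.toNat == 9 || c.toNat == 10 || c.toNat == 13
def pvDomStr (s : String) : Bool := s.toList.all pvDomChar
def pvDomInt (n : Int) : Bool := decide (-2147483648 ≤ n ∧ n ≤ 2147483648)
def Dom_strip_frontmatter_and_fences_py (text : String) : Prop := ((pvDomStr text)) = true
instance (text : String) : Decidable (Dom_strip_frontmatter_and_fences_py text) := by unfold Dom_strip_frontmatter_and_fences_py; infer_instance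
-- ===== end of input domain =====

-- B replaces A's frontmatter pre-scan followed by a second walk of all lines with a single
-- forward pass driven by a state variable (start / frontmatter-buffer / body); same complexity.

-- ===== PORT A =====
-- inner `for j in range(idx+1, len(lines))` looking for the closing `---`
def pvFindClose : List String → Int → Option Int
  | [], _ => none
  | l :: rest, j => if PySem.Str.strip l = "---" then some j else pvFindClose rest (j + 1)

-- first loop: detect frontmatter at the first non-empty line
def pvFmScan : List String → Int → Bool × Option Int
  | [], _ => (false, none)
  | l :: rest, idx =>
    if PySem.Str.strip l = "" then pvFmScan rest (idx + 1)
    else if PySem.Str.strip l = "---" then (true, pvFindClose rest (idx + 1))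
    else (false, none)

-- second loop: skip the frontmatter region, then fence-aware emission
def pvLoopA (inFM : Bool) (fmEnd : Option Int) : List String → Int → Option String → List (Int × String)
  | [], _, _ => []
  | line :: rest, i, fence =>
    if inFM && (match fmEnd with | some e => decide (i ≤ e) | none => false) then
      pvLoopA inFM fmEnd rest (i + 1) fence
    else
      let stripped := PySem.Str.lstrip line
      match fence with
      | none =>
        if PySem.Str.startswith stripped "```" || PySem.Str.startswith stripped "~~~" then
          pvLoopA inFM fmEnd rest (i + 1) (some (PySem.Str.slice stripped none (some 3)))
        else (i + 1, line) :: pvLoopA inFM fmEnd rest (i + 1) none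
      | some f =>
        if PySem.Str.startswith stripped f then pvLoopA inFM fmEnd rest (i + 1) none
        else pvLoopA inFM fmEnd rest (i + 1) (some f)

def strip_frontmatter_and_fences_py (text : String) : List (Int × String) :=
  let lines := PySem.Str.splitlines text
  let fm := pvFmScan lines 0
  pvLoopA fm.1 fm.2 lines 0 none

-- ===== PORT B =====
-- `for p in buf: emit(*p)`: run emit over the buffered pairs, returning (emitted, fence)
def pvEmitAll : List (Int × String) → Option String → List (Int × String) × Option String
  | [], fence => ([], fence)
  | (i, line) :: rest, fence =>
    let s := PySem.Str.lstrip line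
    match fence with
    | none =>
      if PySem.Str.startswith s "```" || PySem.Str.startswith s "~~~" then
        pvEmitAll rest (some (PySem.Str.slice s none (some 3)))
      else
        let p := pvEmitAll rest none
        ((i + 1, line) :: p.1, p.2)
    | some f =>
      if PySem.Str.startswith s f then pvEmitAll rest none else pvEmitAll rest (some f)

-- the "body" state: emit each remaining line
def pvBody : List String → Int → Option String → List (Int × String)
  | [], _, _ => []
  | line :: rest, i, fence =>
    let s := PySem.Str.lstrip line
    match fence with
    | none =>
      if PySem.Str.startswith s "```" || PySem.Str.startswith s "~~~" then
        pvBody rest (i + 1) (some (PySem.Str.slice s none (some 3)))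
      else (i + 1, line) :: pvBody rest (i + 1) none
    | some f =>
      if PySem.Str.startswith s f then pvBody rest (i + 1) none else pvBody rest (i + 1) (some f)

-- the "fm" state: buffer until a closing `---` (drop all) or EOF (flush the buffer)
def pvFM : List String → Int → List (Int × String) → List (Int × String)
  | [], _, buf => (pvEmitAll buf none).1
  | line :: rest, i, buf =>
    if PySem.Str.strip line = "---" then pvBody rest (i + 1) none
    else pvFM rest (i + 1) (buf ++ [(i, line)])

-- the "start" state: buffer blanks; `---` opens a frontmatter candidate; anything else flushes
def pvStart : List String → Int → List (Int × String) → List (Int × String)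
  | [], _, buf => (pvEmitAll buf none).1
  | line :: rest, i, buf =>
    let s := PySem.Str.strip line
    if s = "" then pvStart rest (i + 1) (buf ++ [(i, line)])
    else if s = "---" then pvFM rest (i + 1) (buf ++ [(i, line)])
    else
      let p := pvEmitAll (buf ++ [(i, line)]) none
      p.1 ++ pvBody rest (i + 1) p.2

def strip_frontmatter_and_fences_py_alt (text : String) : List (Int × String) :=
  pvStart (PySem.Str.splitlines text) 0 []

-- ===== PRECONDITION & SPEC =====
def Spec_strip_frontmatter_and_fences_py (text : String) (out : List (Int × String)) : Prop := out = strip_frontmatter_and_fences_py_alt text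
instance (text : String) (out : List (Int × String)) : Decidable (Spec_strip_frontmatter_and_fences_py text out) := by unfold Spec_strip_frontmatter_and_fences_py; infer_instance

-- ===== CLAIM (what is proved, stated in full; the proofs are below) =====
def Claim_equal_strip_frontmatter_and_fences_py : Prop := ∀ (text : String), Dom_strip_frontmatter_and_fences_py text → Spec_strip_frontmatter_and_fences_py text (strip_frontmatter_and_fences_py text)

-- ===== LEMMAS AND PROOFS =====

-- flushing an enumerated prefix through emit, then continuing in body state, is one body run
lemma pvEmitAll_body (xs : List String) : ∀ (ys : List String) (j : Int) (fence : Option String),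
    (pvEmitAll (PySem.List.enumerate xs j) fence).1
      ++ pvBody ys (j + xs.length) (pvEmitAll (PySem.List.enumerate xs j) fence).2
    = pvBody (xs ++ ys) j fence := by
  induction xs with
  | nil => intro ys j fence; simp [PySem.List.enumerate_nil, pvEmitAll]
  | cons x xs ih =>
    intro ys j fence
    rw [PySem.List.enumerate_cons,
      show j + (((x :: xs).length : Nat) : Int) = (j + 1) + ((xs.length : Nat) : Int) by
        simp only [List.length_cons]; push_cast; ring]
    cases fence with
    | none =>
      simp only [pvEmitAll, pvBody, List.cons_append]
      split_ifs with h
      · exact ih ys (j + 1) _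
      · simp only [List.cons_append]
        rw [← ih ys (j + 1) none]
    | some f =>
      simp only [pvEmitAll, pvBody, List.cons_append]
      split_ifs with h
      · exact ih ys (j + 1) none
      · exact ih ys (j + 1) (some f)

lemma pvLoopA_none (ls : List String) : ∀ (i : Int) (fence : Option String) (b : Bool),
    pvLoopA b none ls i fence = pvBody ls i fence := by
  induction ls with
  | nil => intro i fence b; rfl
  | cons l rest ih =>
    intro i fence b
    cases fence with
    | none =>
      simp only [pvLoopA, pvBody, Bool.and_false, Bool.false_eq_true, if_false]
      split_ifs with h
      · exact ih (i + 1) _ b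
      · rw [ih (i + 1) none b]
    | some f =>
      simp only [pvLoopA, pvBody, Bool.and_false, Bool.false_eq_true, if_false]
      split_ifs with h
      · exact ih (i + 1) none b
      · exact ih (i + 1) (some f) b

lemma pvLoopA_gt (ls : List String) : ∀ (i e : Int) (fence : Option String), e < i →
    pvLoopA true (some e) ls i fence = pvBody ls i fence := by
  induction ls with
  | nil => intro i e fence _; rfl
  | cons l rest ih =>
    intro i e fence hlt
    have hd : decide (i ≤ e) = false := by simp; omega
    cases fence with
    | none =>
      simp only [pvLoopA, pvBody, hd, Bool.and_false, Bool.false_eq_true, if_false]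
      split_ifs with h
      · exact ih (i + 1) e _ (by omega)
      · rw [ih (i + 1) e none (by omega)]
    | some f =>
      simp only [pvLoopA, pvBody, hd, Bool.and_false, Bool.false_eq_true, if_false]
      split_ifs with h
      · exact ih (i + 1) e none (by omega)
      · exact ih (i + 1) e (some f) (by omega)

lemma pvLoopA_skip (xs : List String) : ∀ (ys : List String) (j e : Int) (fence : Option String),
    j + (xs.length : Int) = e + 1 →
    pvLoopA true (some e) (xs ++ ys) j fence = pvBody ys (e + 1) fence := by
  induction xs with
  | nil =>
    intro ys j e fence hlen
    have : j = e + 1 := by simpa using hlen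
    subst this
    simpa using pvLoopA_gt ys (e + 1) e fence (by omega)
  | cons x xs ih =>
    intro ys j e fence hlen
    have hj : j ≤ e := by
      have h0 : (0 : Int) ≤ (xs.length : Int) := by positivity
      simp only [List.length_cons] at hlen; push_cast at hlen; omega
    have hd : decide (j ≤ e) = true := by simpa using hj
    simp only [List.cons_append, pvLoopA, hd, Bool.and_true, if_pos]
    exact ih ys (j + 1) e fence (by simp only [List.length_cons] at hlen; push_cast at hlen ⊢; omega)

lemma pvFmScan_blank_prefix (bl : List String) : ∀ (rest : List String) (j : Int),
    (∀ l ∈ bl, PySem.Str.strip l = "") →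
    pvFmScan (bl ++ rest) j = pvFmScan rest (j + (bl.length : Int)) := by
  induction bl with
  | nil => intro rest j _; simp
  | cons b bl ih =>
    intro rest j hbl
    have hb : PySem.Str.strip b = "" := hbl b (by simp)
    simp only [List.cons_append, pvFmScan, hb, if_pos]
    rw [ih rest (j + 1) (fun l hl => hbl l (by simp [hl]))]
    congr 1
    simp only [List.length_cons]; push_cast; ring

-- the frontmatter-buffer state against A's second loop with the scan's result
lemma pvFM_eq (rest : List String) : ∀ (ml : List String) (j : Int),
    pvFM rest (j + (ml.length : Int)) (PySem.List.enumerate ml j)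
    = pvLoopA true (pvFindClose rest (j + (ml.length : Int))) (ml ++ rest) j none := by
  induction rest with
  | nil =>
    intro ml j
    have h := pvEmitAll_body ml [] j none
    simp only [pvBody, List.append_nil] at h
    simp only [pvFM, pvFindClose, pvLoopA_none, List.append_nil]
    rw [← h]
  | cons r rest ih =>
    intro ml j
    have hlen : j + ((ml ++ [r]).length : Int) = j + (ml.length : Int) + 1 := by
      simp only [List.length_append, List.length_cons, List.length_nil]; push_cast; omega
    by_cases h : PySem.Str.strip r = "---"
    · simp only [pvFM, pvFindClose, h, if_pos]
      rw [show ml ++ r :: rest = (ml ++ [r]) ++ rest by simp]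
      rw [pvLoopA_skip (ml ++ [r]) rest j (j + (ml.length : Int)) none (by omega)]
    · simp only [pvFM, pvFindClose, h, if_neg, not_false_iff]
      have henum : PySem.List.enumerate ml j ++ [(j + (ml.length : Int), r)]
          = PySem.List.enumerate (ml ++ [r]) j := by
        rw [PySem.List.enumerate_append]; rfl
      rw [henum, show j + (ml.length : Int) + 1 = j + ((ml ++ [r]).length : Int) from hlen.symm,
        ih (ml ++ [r]) j, List.append_assoc]
      rfl

-- the start state with a buffered all-blank prefix against the whole of A
lemma pvStart_eq (lines : List String) : ∀ (bl : List String) (j : Int),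
    (∀ l ∈ bl, PySem.Str.strip l = "") →
    pvStart lines (j + (bl.length : Int)) (PySem.List.enumerate bl j)
    = pvLoopA (pvFmScan (bl ++ lines) j).1 (pvFmScan (bl ++ lines) j).2 (bl ++ lines) j none := by
  induction lines with
  | nil =>
    intro bl j hbl
    rw [pvFmScan_blank_prefix bl [] j hbl]
    have h := pvEmitAll_body bl [] j none
    simp only [pvBody, List.append_nil] at h
    simp only [pvStart, pvFmScan, pvLoopA_none, List.append_nil]
    rw [← h]
  | cons l rest ih =>
    intro bl j hbl
    rw [pvFmScan_blank_prefix bl (l :: rest) j hbl]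
    have henum : PySem.List.enumerate bl j ++ [(j + (bl.length : Int), l)]
        = PySem.List.enumerate (bl ++ [l]) j := by
      rw [PySem.List.enumerate_append]; rfl
    have harith : j + (bl.length : Int) + 1 = j + ((bl ++ [l]).length : Int) := by
      simp only [List.length_append, List.length_cons, List.length_nil]; push_cast; omega
    by_cases h0 : PySem.Str.strip l = ""
    · have hbl' : ∀ x ∈ bl ++ [l], PySem.Str.strip x = "" := by
        intro x hx
        rcases List.mem_append.1 hx with hx | hx
        · exact hbl x hx
        · simp only [List.mem_singleton] at hx; rw [hx]; exact h0
      simp only [pvStart, pvFmScan, h0, if_pos]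
      rw [henum, harith, ih (bl ++ [l]) j hbl',
        pvFmScan_blank_prefix (bl ++ [l]) rest j hbl', List.append_assoc]
      rfl
    · by_cases h1 : PySem.Str.strip l = "---"
      · simp only [pvStart, pvFmScan, h1, if_pos]
        rw [henum, harith, pvFM_eq rest (bl ++ [l]) j, ← harith, List.append_assoc]
        rfl
      · simp only [pvStart, pvFmScan, h0, h1, if_neg, not_false_iff]
        rw [pvLoopA_none]
        have h := pvEmitAll_body (bl ++ [l]) rest j none
        rw [henum, show j + (bl.length : Int) + 1 = j + ((bl ++ [l]).length : Int) from harith,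
          h, List.append_assoc]
        rfl

-- ===== VERDICT (by name: the statement is the Claim_ definition above) =====
theorem strip_frontmatter_and_fences_py_spec : Claim_equal_strip_frontmatter_and_fences_py := by
  intro text _
  unfold Spec_strip_frontmatter_and_fences_py strip_frontmatter_and_fences_py strip_frontmatter_and_fences_py_alt
  have := pvStart_eq (PySem.Str.splitlines text) [] 0 (by simp)
  simpa [PySem.List.enumerate_nil] using this.symm
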